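-- pv_equiv track=rewrite | github.com/rupeshtiwari/youtube-automation-suite | app/session_shorts_generator.py | suggest_playlist
-- ===== SOURCE A (Python) =====
-- def suggest_playlist(role: str, type_val: str) -> str:
--     """
--     Intelligently suggest which YouTube playlist this short should go to.
--     Based on role and type, match to existing playlists.
--     """
--     # Map of (role, type) to playlist suggestions
--     playlist_map = {
--         # System Design
--         ('sa', 'sys_design'): 'System Design for Solutions Architects',
--         ('sa', 'system_design'): 'System Design for Solutions Architects',
--         ('swe', 'sys_design'): 'System Design Interview Prep',
--         ('em', 'sys_design'): 'System Design for Engineering Managers',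
--
--         # Behavioral/Leadership
--         ('em', 'behavioral'): 'Behavioral Interview for Managers',
--         ('mgr', 'behavioral'): 'Behavioral Interview for Managers',
--         ('dir', 'behavioral'): 'Leadership Interview Prep',
--         ('vp', 'behavioral'): 'Executive Interview Prep',
--         ('em', 'leadership'): 'Leadership Coaching',
--         ('mgr', 'leadership'): 'Leadership Coaching',
--
--         # Resume
--         (None, 'resume_review'): 'Resume Review & Career Coaching',
--         (None, 'resume'): 'Resume Review & Career Coaching',
--
--         # Salary
--         (None, 'salary_negotiation'): 'Salary Negotiation',
--
--         # Data Engineering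
--         ('data_engineer', 'data_engineering'): 'Data Engineering Interviews',
--         ('de', 'data_engineering'): 'Data Engineering Interviews',
--
--         # Career
--         (None, 'career_coaching'): 'Career Coaching',
--
--         # Product Management
--         ('pm', 'product'): 'Product Manager Interviews',
--         ('tpm', 'product'): 'Technical Program Manager Interviews',
--     }
--
--     # Try exact match
--     suggestion = playlist_map.get((role, type_val))
--     if suggestion:
--         return suggestion
--
--     # Try role-only match
--     for (r, t), playlist in playlist_map.items():
--         if r == role and not t:
--             return playlist
--
--     # Try type-only match
--     for (r, t), playlist in playlist_map.items():
--         if t == type_val and not r: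
--             return playlist
--
--     # Default based on type
--     type_defaults = {
--         'sys_design': 'System Design Interview Prep',
--         'behavioral': 'Behavioral Interview Prep',
--         'leadership': 'Leadership Coaching',
--         'resume': 'Resume Review & Career Coaching',
--         'salary_negotiation': 'Salary Negotiation',
--         'career_coaching': 'Career Coaching'
--     }
--
--     return type_defaults.get(type_val, 'Interview Coaching')
-- ===== SOURCE B (Python) =====
-- def suggest_playlist(role: str, type_val: str) -> str:
--     """Type-major decision tree: branch on type_val first, then on role."""
--     if type_val in ('sys_design', 'system_design'):
--         if role == 'sa':
--             return 'System Design for Solutions Architects'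
--         if type_val == 'sys_design':
--             if role == 'em':
--                 return 'System Design for Engineering Managers'
--             return 'System Design Interview Prep'
--         return 'Interview Coaching'
--     if type_val == 'behavioral':
--         by_role = {
--             'em': 'Behavioral Interview for Managers',
--             'mgr': 'Behavioral Interview for Managers',
--             'dir': 'Leadership Interview Prep',
--             'vp': 'Executive Interview Prep',
--         }
--         return by_role.get(role, 'Behavioral Interview Prep')
--     if type_val == 'leadership':
--         return 'Leadership Coaching'
--     if type_val in ('resume_review', 'resume'):
--         return 'Resume Review & Career Coaching'
--     if type_val == 'salary_negotiation':
--         return 'Salary Negotiation'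
--     if type_val == 'career_coaching':
--         return 'Career Coaching'
--     if type_val == 'data_engineering' and role in ('data_engineer', 'de'):
--         return 'Data Engineering Interviews'
--     if type_val == 'product':
--         if role == 'pm':
--             return 'Product Manager Interviews'
--         if role == 'tpm':
--             return 'Technical Program Manager Interviews'
--     return 'Interview Coaching'
-- ===== Notes on version B (the rewrite author's own statement) =====
-- stated objective: simpler
-- what changed: Replaces A's flat (role,type)-keyed table lookup plus two linear fallback scan loops over the table (one of which is dead code) by a type-major decision tree that branches on type_val first and then on role, with the dead entries and redundant defaults collapsed.
import Mathlib
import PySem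

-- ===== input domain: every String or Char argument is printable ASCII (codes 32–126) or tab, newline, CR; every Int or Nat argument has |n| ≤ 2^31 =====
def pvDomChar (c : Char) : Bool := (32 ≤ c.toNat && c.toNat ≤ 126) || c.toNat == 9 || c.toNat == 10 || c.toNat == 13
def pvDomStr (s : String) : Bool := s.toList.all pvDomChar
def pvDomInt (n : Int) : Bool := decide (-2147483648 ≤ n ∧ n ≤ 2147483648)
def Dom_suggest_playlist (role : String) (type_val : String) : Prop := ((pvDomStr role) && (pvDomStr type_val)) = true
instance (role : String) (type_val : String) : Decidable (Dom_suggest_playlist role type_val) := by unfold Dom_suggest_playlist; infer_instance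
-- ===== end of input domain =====

-- B replaces A's flat (role, type) table plus two fallback scan loops by a type-major decision
-- tree with the dead table entries collapsed (objective: simpler). Return values are identical.

-- ===== PORT A =====
-- A's playlist_map: dict keyed by (Optional[str], str) pairs, in source order.
def pvPlaylistMap : PySem.Dict (Option String × String) String := PySem.Dict.mk [
  ((some "sa", "sys_design"), "System Design for Solutions Architects"),
  ((some "sa", "system_design"), "System Design for Solutions Architects"),
  ((some "swe", "sys_design"), "System Design Interview Prep"),
  ((some "em", "sys_design"), "System Design for Engineering Managers"),
  ((some "em", "behavioral"), "Behavioral Interview for Managers"),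
  ((some "mgr", "behavioral"), "Behavioral Interview for Managers"),
  ((some "dir", "behavioral"), "Leadership Interview Prep"),
  ((some "vp", "behavioral"), "Executive Interview Prep"),
  ((some "em", "leadership"), "Leadership Coaching"),
  ((some "mgr", "leadership"), "Leadership Coaching"),
  ((none, "resume_review"), "Resume Review & Career Coaching"),
  ((none, "resume"), "Resume Review & Career Coaching"),
  ((none, "salary_negotiation"), "Salary Negotiation"),
  ((some "data_engineer", "data_engineering"), "Data Engineering Interviews"),
  ((some "de", "data_engineering"), "Data Engineering Interviews"),
  ((none, "career_coaching"), "Career Coaching"),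
  ((some "pm", "product"), "Product Manager Interviews"),
  ((some "tpm", "product"), "Technical Program Manager Interviews")]

-- A's type_defaults dict.
def pvTypeDefaults : PySem.Dict String String := PySem.Dict.mk [
  ("sys_design", "System Design Interview Prep"),
  ("behavioral", "Behavioral Interview Prep"),
  ("leadership", "Leadership Coaching"),
  ("resume", "Resume Review & Career Coaching"),
  ("salary_negotiation", "Salary Negotiation"),
  ("career_coaching", "Career Coaching")]

-- Python truthiness of an Optional[str] value ('if suggestion:', 'not t', 'not r').
def pvTruthy : Option String → Bool
  | none => false
  | some s => !(s == "")

-- A step for step: exact .get lookup, then the two for-loops with early return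
-- (a for-loop that returns on the first hit is List.find?), then type_defaults.get.
def suggest_playlist (role : String) (type_val : String) : String :=
  let suggestion := pvPlaylistMap.get? (some role, type_val)
  if pvTruthy suggestion then suggestion.getD "" else
  match pvPlaylistMap.items.find? (fun p => p.1.1 == some role && !pvTruthy (some p.1.2)) with
  | some p => p.2
  | none =>
    match pvPlaylistMap.items.find? (fun p => p.1.2 == type_val && !pvTruthy p.1.1) with
    | some p => p.2
    | none => pvTypeDefaults.getD type_val "Interview Coaching"

-- ===== PORT B =====
-- B's by_role dict for the 'behavioral' branch.
def pvBehavioralByRole : PySem.Dict String String := PySem.Dict.mk [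
  ("em", "Behavioral Interview for Managers"),
  ("mgr", "Behavioral Interview for Managers"),
  ("dir", "Leadership Interview Prep"),
  ("vp", "Executive Interview Prep")]

def suggest_playlist_alt (role : String) (type_val : String) : String :=
  if type_val == "sys_design" || type_val == "system_design" then
    if role == "sa" then "System Design for Solutions Architects"
    else if type_val == "sys_design" then
      if role == "em" then "System Design for Engineering Managers"
      else "System Design Interview Prep"
    else "Interview Coaching"
  else if type_val == "behavioral" then pvBehavioralByRole.getD role "Behavioral Interview Prep"
  else if type_val == "leadership" then "Leadership Coaching"
  else if type_val == "resume_review" || type_val == "resume" then "Resume Review & Career Coaching"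
  else if type_val == "salary_negotiation" then "Salary Negotiation"
  else if type_val == "career_coaching" then "Career Coaching"
  else if type_val == "data_engineering" && (role == "data_engineer" || role == "de") then "Data Engineering Interviews"
  else if type_val == "product" then
    if role == "pm" then "Product Manager Interviews"
    else if role == "tpm" then "Technical Program Manager Interviews"
    else "Interview Coaching"
  else "Interview Coaching"

-- ===== PRECONDITION & SPEC =====
def Spec_suggest_playlist (role : String) (type_val : String) (out : String) : Prop := out = suggest_playlist_alt role type_val
instance (role : String) (type_val : String) (out : String) : Decidable (Spec_suggest_playlist role type_val out) := by unfold Spec_suggest_playlist; infer_instance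

-- ===== CLAIM (what is proved, stated in full; the proofs are below) =====
def Claim_equal_suggest_playlist : Prop := ∀ (role : String) (type_val : String), Dom_suggest_playlist role type_val → Spec_suggest_playlist role type_val (suggest_playlist role type_val)

-- ===== LEMMAS AND PROOFS =====
theorem pv_get?_nil {κ ν : Type} [BEq κ] (x : κ) : (PySem.Dict.mk ([] : List (κ × ν))).get? x = none := rfl

theorem pv_eq (role type_val : String) : suggest_playlist role type_val = suggest_playlist_alt role type_val := by
  by_cases h1 : type_val = "sys_design"
  · subst h1
    by_cases r1 : role = "sa"; · subst r1; decide
    by_cases r2 : role = "swe"; · subst r2; decide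
    by_cases r3 : role = "em"; · subst r3; decide
    simp [suggest_playlist, suggest_playlist_alt, pvPlaylistMap, pvTypeDefaults, pvTruthy,
      PySem.Dict.get?_mk_cons, PySem.Dict.getD_eq_get?_getD, List.find?_cons_of_neg,
      pv_get?_nil, r1, r3, Ne.symm r1, Ne.symm r2, Ne.symm r3]
  by_cases h2 : type_val = "system_design"
  · subst h2
    by_cases r1 : role = "sa"; · subst r1; decide
    simp [suggest_playlist, suggest_playlist_alt, pvPlaylistMap, pvTypeDefaults, pvTruthy,
      PySem.Dict.get?_mk_cons, PySem.Dict.getD_eq_get?_getD, List.find?_cons_of_neg,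
      pv_get?_nil, r1, Ne.symm r1]
  by_cases h3 : type_val = "behavioral"
  · subst h3
    by_cases r1 : role = "em"; · subst r1; decide
    by_cases r2 : role = "mgr"; · subst r2; decide
    by_cases r3 : role = "dir"; · subst r3; decide
    by_cases r4 : role = "vp"; · subst r4; decide
    simp [suggest_playlist, suggest_playlist_alt, pvPlaylistMap, pvTypeDefaults, pvBehavioralByRole,
      pvTruthy, PySem.Dict.get?_mk_cons, PySem.Dict.getD_eq_get?_getD, List.find?_cons_of_neg,
      pv_get?_nil, Ne.symm r1, Ne.symm r2, Ne.symm r3, Ne.symm r4]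
  by_cases h4 : type_val = "leadership"
  · subst h4
    by_cases r1 : role = "em"; · subst r1; decide
    by_cases r2 : role = "mgr"; · subst r2; decide
    simp [suggest_playlist, suggest_playlist_alt, pvPlaylistMap, pvTypeDefaults, pvTruthy,
      PySem.Dict.get?_mk_cons, PySem.Dict.getD_eq_get?_getD, List.find?_cons_of_neg,
      pv_get?_nil, Ne.symm r1, Ne.symm r2]
  by_cases h5 : type_val = "resume_review"
  · subst h5
    simp [suggest_playlist, suggest_playlist_alt, pvPlaylistMap, pvTruthy,
      PySem.Dict.get?_mk_cons, List.find?_cons_of_neg, pv_get?_nil]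
  by_cases h6 : type_val = "resume"
  · subst h6
    simp [suggest_playlist, suggest_playlist_alt, pvPlaylistMap, pvTruthy,
      PySem.Dict.get?_mk_cons, List.find?_cons_of_neg, pv_get?_nil]
  by_cases h7 : type_val = "salary_negotiation"
  · subst h7
    simp [suggest_playlist, suggest_playlist_alt, pvPlaylistMap, pvTruthy,
      PySem.Dict.get?_mk_cons, List.find?_cons_of_neg, pv_get?_nil]
  by_cases h8 : type_val = "career_coaching"
  · subst h8
    simp [suggest_playlist, suggest_playlist_alt, pvPlaylistMap, pvTruthy,
      PySem.Dict.get?_mk_cons, List.find?_cons_of_neg, pv_get?_nil]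
  by_cases h9 : type_val = "data_engineering"
  · subst h9
    by_cases r1 : role = "data_engineer"; · subst r1; decide
    by_cases r2 : role = "de"; · subst r2; decide
    simp [suggest_playlist, suggest_playlist_alt, pvPlaylistMap, pvTypeDefaults, pvTruthy,
      PySem.Dict.get?_mk_cons, PySem.Dict.getD_eq_get?_getD, List.find?_cons_of_neg,
      pv_get?_nil, r1, r2, Ne.symm r1, Ne.symm r2]
  by_cases h10 : type_val = "product"
  · subst h10
    by_cases r1 : role = "pm"; · subst r1; decide
    by_cases r2 : role = "tpm"; · subst r2; decide
    simp [suggest_playlist, suggest_playlist_alt, pvPlaylistMap, pvTypeDefaults, pvTruthy,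
      PySem.Dict.get?_mk_cons, PySem.Dict.getD_eq_get?_getD, List.find?_cons_of_neg,
      pv_get?_nil, r1, r2, Ne.symm r1, Ne.symm r2]
  simp [suggest_playlist, suggest_playlist_alt, pvPlaylistMap, pvTypeDefaults, pvTruthy,
    PySem.Dict.get?_mk_cons, PySem.Dict.getD_eq_get?_getD, List.find?_cons_of_neg, pv_get?_nil,
    h1, h2, h3, h4, h5, h6, h7, h8, h9, h10, Ne.symm h1, Ne.symm h2, Ne.symm h3, Ne.symm h4,
    Ne.symm h5, Ne.symm h6, Ne.symm h7, Ne.symm h8, Ne.symm h9, Ne.symm h10]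

-- ===== VERDICT (by name: the statement is the Claim_ definition above) =====
theorem suggest_playlist_spec : Claim_equal_suggest_playlist := by
  intro role type_val _
  exact pv_eq role type_val
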